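-- pv_equiv track=rewrite | github.com/Favo02/competitive-programming | codyssi/2024/problem02/part3.py | solve
-- ===== SOURCE A (Python) =====
-- def solve(gates):
--   if len(gates) == 0:
--     return 0
--   res = []
--   count = 0
--   for i, (a, b) in enumerate(zip(gates[::2], gates[1::2])):
--     if ((i % 2 == 0) and (a and b)) or ((i % 2 == 1) and (a or b)):
--       res.append(True)
--       count += 1
--     else:
--       res.append(False)
--   return count + solve(res)
-- ===== SOURCE B (Python) =====
-- def solve(gates):
--   total = 0
--   while gates:
--     gates = [(a and b) if i % 2 == 0 else (a or b)
--              for i, (a, b) in enumerate(zip(gates[::2], gates[1::2]))]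
--     total += sum(gates)
--   return total
-- ===== Notes on version B (the rewrite author's own statement) =====
-- stated objective: simpler
-- what changed: Replaced A's self-recursion (count per level, then recurse on the reduced list) by an iterative while-loop that keeps a running total, builds each next level as a single comprehension and adds its sum of Trues.
import Mathlib
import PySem

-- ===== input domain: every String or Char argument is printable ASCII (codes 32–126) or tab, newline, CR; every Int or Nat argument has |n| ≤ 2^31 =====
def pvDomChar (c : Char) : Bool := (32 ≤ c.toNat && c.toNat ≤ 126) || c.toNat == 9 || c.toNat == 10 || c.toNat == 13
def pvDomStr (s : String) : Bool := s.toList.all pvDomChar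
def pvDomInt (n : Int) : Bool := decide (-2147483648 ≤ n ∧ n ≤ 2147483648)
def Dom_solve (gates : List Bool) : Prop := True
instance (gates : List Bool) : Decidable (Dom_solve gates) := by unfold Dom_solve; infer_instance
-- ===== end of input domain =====

-- B replaces A's self-recursion by a while-loop with a running total, building each
-- level as a comprehension and summing it afterwards (objective: simpler decomposition, same cost).

-- terminating-measure lemma used by both ports: the odd-index slice gates[1::2]
-- is strictly shorter than a non-empty gates
theorem pvOddSliceLen {α : Type} (gates : List α) (h : gates ≠ []) :
    ((PySem.List.slice? gates (some 1) none 2).getD []).length < gates.length := by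
  have hn : 1 ≤ gates.length := List.length_pos_iff.mpr h
  have hle : ((PySem.List.slice? gates (some 1) none 2).getD []).length
      ≤ (((gates.length : Int)) / 2).toNat := by
    simp only [PySem.List.slice?, PySem.List.sliceIndices]
    norm_num
    refine le_trans (le_trans (List.length_filterMap_le _ _) (by rw [List.length_range])) ?_
    split_ifs <;> omega
  omega

-- ===== PORT A =====
-- the body of A's for-loop, verbatim: state (res, count), item (i, (a, b))
def pvStepA (st : List Bool × Int) (p : Int × (Bool × Bool)) : List Bool × Int :=
  if ((PySem.Int.mod p.1 2 == 0) && (p.2.1 && p.2.2))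
      || ((PySem.Int.mod p.1 2 == 1) && (p.2.1 || p.2.2))
  then (st.1 ++ [true], st.2 + 1) else (st.1 ++ [false], st.2)

theorem pvFoldl_pvStepA_len (l : List (Int × (Bool × Bool))) (st : List Bool × Int) :
    ((l.foldl pvStepA st).1).length = st.1.length + l.length := by
  induction l generalizing st with
  | nil => simp
  | cons p t ih =>
    simp only [List.foldl_cons, List.length_cons, ih]
    unfold pvStepA; split_ifs <;> simp <;> omega

-- gates[::2] / gates[1::2] are the step-2 slices; step = 2 ≠ 0 so slice? is always
-- `some` (the getD [] default never fires); i % 2 is PySem.Int.mod (exact Python %);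
-- the for-loop over enumerate(zip(...)) is the foldl of pvStepA from ([], 0)
def solve (gates : List Bool) : Int :=
  if gates.length = 0 then 0
  else
    let evens := (PySem.List.slice? gates none none 2).getD []
    let odds := (PySem.List.slice? gates (some 1) none 2).getD []
    let rc := (PySem.List.enumerate (evens.zip odds)).foldl pvStepA ([], 0)
    rc.2 + solve rc.1
termination_by gates.length
decreasing_by
  have h : gates ≠ [] := by intro hnil; subst hnil; simp at *
  have h1 := pvFoldl_pvStepA_len (PySem.List.enumerate
      (((PySem.List.slice? gates none none 2).getD []).zip
       ((PySem.List.slice? gates (some 1) none 2).getD []))) ([], 0)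
  have h2 := pvOddSliceLen gates h
  simp only [PySem.List.length_enumerate, List.length_zip, List.length_nil] at h1
  omega

-- ===== PORT B =====
-- the comprehension body of Source B's while-loop, verbatim: item (i, (a, b))
def pvG (p : Int × (Bool × Bool)) : Bool :=
  if PySem.Int.mod p.1 2 == 0 then p.2.1 && p.2.2 else p.2.1 || p.2.2

-- Source B's while-loop: recursion on gates with the running total as accumulator;
-- the comprehension is the map of pvG, sum(gates) is the count of `true`s
def solveAltLoop (gates : List Bool) (total : Int) : Int :=
  if gates.isEmpty then total
  else
    let next := (PySem.List.enumerate
        (((PySem.List.slice? gates none none 2).getD []).zip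
         ((PySem.List.slice? gates (some 1) none 2).getD []))).map pvG
    solveAltLoop next (total + (next.count true : Int))
termination_by gates.length
decreasing_by
  have h : gates ≠ [] := by intro hnil; subst hnil; simp at *
  have := pvOddSliceLen gates h
  simp only [List.length_map, PySem.List.length_enumerate, List.length_zip]
  omega

def solve_alt (gates : List Bool) : Int := solveAltLoop gates 0

-- ===== PRECONDITION & SPEC =====
def Spec_solve (gates : List Bool) (out : Int) : Prop := out = solve_alt gates
instance (gates : List Bool) (out : Int) : Decidable (Spec_solve gates out) := by unfold Spec_solve; infer_instance

-- ===== CLAIM (what is proved, stated in full; the proofs are below) =====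
def Claim_equal_solve : Prop := ∀ (gates : List Bool), Dom_solve gates → Spec_solve gates (solve gates)

-- ===== LEMMAS AND PROOFS =====

-- Python's i % 2 is 0 or 1 (nonnegative since the divisor is positive)
theorem pvModTwo (i : Int) : PySem.Int.mod i 2 = 0 ∨ PySem.Int.mod i 2 = 1 := by
  have h1 : 0 ≤ PySem.Int.mod i 2 := by
    simp only [PySem.Int.mod]; exact Int.fmod_nonneg_of_pos i (by norm_num)
  have h2 : PySem.Int.mod i 2 < 2 := by
    simp only [PySem.Int.mod]; exact Int.fmod_lt_of_pos i (by norm_num)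
  omega

-- A's loop body appends exactly pvG of the item and counts iff it is true
theorem pvStepA_eq (st : List Bool × Int) (p : Int × (Bool × Bool)) :
    pvStepA st p = if pvG p then (st.1 ++ [true], st.2 + 1) else (st.1 ++ [false], st.2) := by
  unfold pvStepA pvG
  rcases pvModTwo p.1 with hm | hm <;>
    rcases hb1 : p.2.1 <;> rcases hb2 : p.2.2 <;> simp [hm, hb1, hb2]

-- A's foldl builds exactly B's mapped list, and its counter is that list's count of `true`s
theorem pvFoldlChar (l : List (Int × (Bool × Bool))) (res0 : List Bool) (c0 : Int) :
    l.foldl pvStepA (res0, c0)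
      = (res0 ++ l.map pvG, c0 + ((l.map pvG).count true : Int)) := by
  induction l generalizing res0 c0 with
  | nil => simp
  | cons p t ih =>
    simp only [List.foldl_cons, List.map_cons, pvStepA_eq]
    cases hg : pvG p <;>
      simp [hg, ih, List.count_cons] <;> push_cast <;> ring

-- the accumulator form of B's loop equals total + A's recursion
theorem pvLoopEq (n : Nat) (gates : List Bool) (h : gates.length ≤ n) (total : Int) :
    solveAltLoop gates total = total + solve gates := by
  induction n generalizing gates total with
  | zero =>
    have hnil : gates = [] := by cases gates with
      | nil => rfl
      | cons a t => simp at h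
    subst hnil
    simp [solveAltLoop.eq_def, solve.eq_def]
  | succ m ih =>
    by_cases hnil : gates = []
    · subst hnil; simp [solveAltLoop.eq_def, solve.eq_def]
    · rw [solveAltLoop.eq_def, solve.eq_def]
      have hne : ¬ gates.isEmpty := by simp [hnil]
      have hlen : ¬ gates.length = 0 := by simp [hnil]
      simp only [hne, hlen, if_neg, Bool.false_eq_true, not_false_eq_true]
      rw [pvFoldlChar]
      simp only [List.nil_append]
      set nx := (PySem.List.enumerate
        (((PySem.List.slice? gates none none 2).getD []).zip
         ((PySem.List.slice? gates (some 1) none 2).getD []))).map pvG with hnx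
      have hsz : nx.length ≤ m := by
        have hlt := pvOddSliceLen gates hnil
        have hle : nx.length ≤
            ((PySem.List.slice? gates (some 1) none 2).getD []).length := by
          simp [hnx, PySem.List.length_enumerate, List.length_zip]
        omega
      rw [ih nx hsz]
      ring

-- ===== VERDICT (by name: the statement is the Claim_ definition above) =====
theorem solve_spec : Claim_equal_solve := by
  intro gates _
  unfold Spec_solve solve_alt
  rw [pvLoopEq gates.length gates le_rfl]
  ring
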